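-- pv_equiv track=rewrite | github.com/kamimrcht/ELECTOR | computeStats.py | nbRightGaps
-- ===== SOURCE A (Python) =====
-- THRESH=5
--
-- def nbRightGaps(sequence):
-- 	nbGaps = 0
-- 	nbNt = 0
-- 	totalGaps = 0
-- 	i = len(sequence) - 1
-- 	while (i >= 0 and nbNt <= THRESH):
-- 		if sequence[i] == ".":
-- 			nbGaps += 1
-- 			nbNt = 0
-- 		else:
-- 			if (nbGaps >= THRESH):
-- 				totalGaps = len(sequence) - i
-- 			nbGaps = 0
-- 			nbNt += 1
-- 		i -= 1
--
-- 	return totalGaps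
-- ===== SOURCE B (Python) =====
-- THRESH = 5
--
-- def nbRightGaps(sequence):
--     # Run-length encode the sequence (runs kept right-to-left: runs[0] is the
--     # rightmost run), then walk the runs instead of the characters.
--     runs = []
--     for c in sequence:
--         g = (c == ".")
--         if runs and runs[0][0] == g:
--             runs[0] = (g, runs[0][1] + 1)
--         else:
--             runs.insert(0, (g, 1))
--     pos = 0
--     total = 0
--     prev = 0
--     for g, length in runs:
--         if g:
--             prev = length
--         else:
--             if prev >= THRESH:
--                 total = pos + 1
--             prev = 0
--             if length >= THRESH + 1:
--                 break
--         pos += length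
--     return total
-- ===== Notes on version B (the rewrite author's own statement) =====
-- stated objective: alternative
-- what changed: B run-length encodes the sequence into (is_gap, length) runs in one forward pass and then walks the runs from the right (constant work per run, stopping at the first non-gap run of length >= THRESH+1), instead of A's per-character indexed while-loop with gap/nt counters.
import Mathlib
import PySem

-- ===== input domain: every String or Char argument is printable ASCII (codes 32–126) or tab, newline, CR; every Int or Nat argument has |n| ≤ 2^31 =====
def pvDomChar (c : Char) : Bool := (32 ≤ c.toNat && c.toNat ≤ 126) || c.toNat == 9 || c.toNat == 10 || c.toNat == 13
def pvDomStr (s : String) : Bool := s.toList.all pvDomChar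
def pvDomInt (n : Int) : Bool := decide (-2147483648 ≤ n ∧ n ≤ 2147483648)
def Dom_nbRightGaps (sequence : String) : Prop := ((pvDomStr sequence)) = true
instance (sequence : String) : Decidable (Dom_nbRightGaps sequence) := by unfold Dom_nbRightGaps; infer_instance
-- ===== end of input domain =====

-- B replaces A's per-character indexed while-loop by a run-length encoding of the
-- sequence followed by a constant-work-per-run walk from the right (objective: alternative).

-- ===== PORT A =====
-- A's while-loop, i = j - 1; the counter j runs n, n-1, …, 0.  s.getD j ' ' is
-- exact for sequence[i]: j is always in range here.
def nbRightGapsLoopA (s : List Char) (n : Int) : Nat → Int → Int → Int → Int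
  | 0, _, _, total => total
  | j+1, nbGaps, nbNt, total =>
    if nbNt ≤ 5 then
      if s.getD j ' ' = '.' then
        nbRightGapsLoopA s n j (nbGaps + 1) 0 total
      else
        nbRightGapsLoopA s n j 0 (nbNt + 1) (if nbGaps ≥ 5 then n - (j : Int) else total)
    else total

def nbRightGaps (sequence : String) : Int :=
  nbRightGapsLoopA sequence.toList (PySem.Str.len sequence) sequence.toList.length 0 0 0

-- ===== PORT B =====
-- merge character c into the run list (head = rightmost run so far)
def rleStep (runs : List (Bool × Int)) (c : Char) : List (Bool × Int) :=
  let g := c == '.'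
  match runs with
  | (b, l) :: rest => if b == g then (g, l + 1) :: rest else (g, 1) :: (b, l) :: rest
  | [] => [(g, 1)]

-- walk the runs from the right: pos = chars consumed, prev = preceding gap-run length
def consumeRuns : List (Bool × Int) → Int → Int → Int → Int
  | [], _, _, total => total
  | (g, length) :: rest, pos, prev, total =>
    if g then consumeRuns rest (pos + length) length total
    else
      let total' := if prev ≥ 5 then pos + 1 else total
      if length ≥ 5 + 1 then total' else consumeRuns rest (pos + length) 0 total'

def nbRightGaps_alt (sequence : String) : Int :=
  consumeRuns (sequence.toList.foldl rleStep []) 0 0 0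

-- ===== PRECONDITION & SPEC =====
def Spec_nbRightGaps (sequence : String) (out : Int) : Prop := out = nbRightGaps_alt sequence
instance (sequence : String) (out : Int) : Decidable (Spec_nbRightGaps sequence out) := by unfold Spec_nbRightGaps; infer_instance

-- ===== CLAIM (what is proved, stated in full; the proofs are below) =====
def Claim_equal_nbRightGaps : Prop := ∀ (sequence : String), Dom_nbRightGaps sequence → Spec_nbRightGaps sequence (nbRightGaps sequence)

-- ===== LEMMAS AND PROOFS =====

-- A's loop re-expressed over the reversed suffix (pos = chars consumed from the right)
def loopRev : List Char → Int → Int → Int → Int → Int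
  | [], _, _, _, t => t
  | c :: cs, pos, g, nt, t =>
    if nt ≤ 5 then
      if c = '.' then loopRev cs (pos + 1) (g + 1) 0 t
      else loopRev cs (pos + 1) 0 (nt + 1) (if g ≥ 5 then pos + 1 else t)
    else t

-- rleStep folded from the right
def rleFwd : List Char → List (Bool × Int)
  | [] => []
  | c :: cs => rleStep (rleFwd cs) c

theorem loopA_eq_loopRev (s : List Char) : ∀ (j : Nat), j ≤ s.length → ∀ g nt t,
    nbRightGapsLoopA s (s.length : Int) j g nt t
      = loopRev ((s.take j).reverse) ((s.length : Int) - j) g nt t := by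
  intro j
  induction j with
  | zero => intro _ g nt t; simp [nbRightGapsLoopA, loopRev]
  | succ j ih =>
    intro hj g nt t
    have hjl : j < s.length := by omega
    have htake : (s.take (j+1)).reverse = s[j] :: (s.take j).reverse := by
      rw [List.take_add_one, List.getElem?_eq_getElem hjl]
      simp
    rw [htake]
    show nbRightGapsLoopA s (s.length : Int) (j+1) g nt t = _
    unfold nbRightGapsLoopA loopRev
    rw [List.getD_eq_getElem s ' ' hjl]
    by_cases h5 : nt ≤ 5
    · simp only [if_pos h5]
      by_cases hc : s[j] = '.'
      · rw [if_pos hc, if_pos hc, ih (by omega)]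
        congr 1
        omega
      · rw [if_neg hc, if_neg hc, ih (by omega)]
        have : (s.length : Int) - ↑(j+1) + 1 = (s.length : Int) - j := by push_cast; ring
        rw [this]
    · simp [if_neg h5]

theorem foldl_rleStep (l : List Char) : l.foldl rleStep [] = rleFwd l.reverse := by
  induction l using List.reverseRecOn with
  | nil => rfl
  | append_singleton l c ih =>
    rw [List.foldl_append, List.foldl_cons, List.foldl_nil, ih, List.reverse_append]
    rfl


theorem loopRev_nil (pos g nt t : Int) : loopRev [] pos g nt t = t := rfl

theorem loopRev_cons (c : Char) (cs : List Char) (pos g nt t : Int) :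
    loopRev (c :: cs) pos g nt t
      = if nt ≤ 5 then
          (if c = '.' then loopRev cs (pos + 1) (g + 1) 0 t
           else loopRev cs (pos + 1) 0 (nt + 1) (if g ≥ 5 then pos + 1 else t))
        else t := rfl

theorem consumeRuns_cons (g : Bool) (len : Int) (rest : List (Bool × Int)) (pos prev t : Int) :
    consumeRuns ((g, len) :: rest) pos prev t
      = if g then consumeRuns rest (pos + len) len t
        else
          (if len ≥ 5 + 1 then (if prev ≥ 5 then pos + 1 else t)
           else consumeRuns rest (pos + len) 0 (if prev ≥ 5 then pos + 1 else t)) := rfl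

theorem rleStep_shape (runs : List (Bool × Int)) (c : Char) :
    ∃ l rest, rleStep runs c = ((c == '.'), l) :: rest := by
  unfold rleStep
  match runs with
  | [] => exact ⟨1, [], rfl⟩
  | (b, l) :: rest =>
    by_cases h : b == (c == '.')
    · exact ⟨l + 1, rest, by simp [h]⟩
    · exact ⟨1, (b, l) :: rest, by simp [h]⟩

theorem rleFwd_run : ∀ (run : List Char) (rest : List Char) (b : Bool), run ≠ [] →
    (∀ c ∈ run, (c == '.') = b) →
    (match rest.head? with | some c' => (c' == '.') = !b | none => True) →
    rleFwd (run ++ rest) = (b, (run.length : Int)) :: rleFwd rest := by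
  intro run
  induction run with
  | nil => intro _ _ h; exact absurd rfl h
  | cons c run' ih =>
    intro rest b _ hclass hrest
    have hc : (c == '.') = b := hclass c (by simp)
    cases run' with
    | nil =>
      show rleStep (rleFwd rest) c = _
      cases rest with
      | nil => simp [rleFwd, rleStep, hc]
      | cons c' cs' =>
        have hc' : (c' == '.') = !b := by simpa using hrest
        obtain ⟨l, r, hr⟩ := rleStep_shape (rleFwd cs') c'
        show rleStep (rleFwd (c' :: cs')) c = _
        have he : rleFwd (c' :: cs') = ((c' == '.'), l) :: r := hr
        rw [he, hc']
        simp [rleStep, hc]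
    | cons c2 run'' =>
      have hrec := ih rest b (by simp) (fun x hx => hclass x (by simp [hx])) hrest
      show rleStep (rleFwd ((c2 :: run'') ++ rest)) c = _
      rw [hrec]
      simp [rleStep, hc]

theorem loopRev_gap_run : ∀ (m : Nat) (rest : List Char) (pos g nt t : Int), nt ≤ 5 →
    loopRev (List.replicate (m + 1) '.' ++ rest) pos g nt t
      = loopRev rest (pos + (m + 1)) (g + (m + 1)) 0 t := by
  intro m
  induction m with
  | zero =>
    intro rest pos g nt t h
    show loopRev ('.' :: rest) pos g nt t = _
    rw [loopRev_cons, if_pos h, if_pos rfl]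
    norm_num
  | succ m ih =>
    intro rest pos g nt t h
    show loopRev ('.' :: (List.replicate (m + 1) '.' ++ rest)) pos g nt t = _
    rw [loopRev_cons, if_pos h, if_pos rfl, ih _ _ _ _ _ (by omega)]
    congr 1 <;> push_cast <;> ring

theorem loopRev_nt_run : ∀ (run rest : List Char) (pos nt t : Int),
    (∀ c ∈ run, (c == '.') = false) → 0 ≤ nt → nt ≤ 6 →
    loopRev (run ++ rest) pos 0 nt t
      = if nt + (run.length : Int) ≤ 6 then loopRev rest (pos + run.length) 0 (nt + run.length) t
        else t := by
  intro run
  induction run with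
  | nil => intro rest pos nt t _ _ h6; simp [h6]
  | cons c run' ih =>
    intro rest pos nt t hclass h0 h6
    have hc : c ≠ '.' := by simpa using hclass c (by simp)
    simp only [List.cons_append, List.length_cons]
    by_cases h5 : nt ≤ 5
    · rw [loopRev_cons, if_pos h5, if_neg hc, if_neg (by omega),
        ih rest (pos + 1) (nt + 1) t (fun x hx => hclass x (by simp [hx])) (by omega) (by omega)]
      have e1 : nt + ((run'.length + 1 : Nat) : Int) = nt + 1 + run'.length := by push_cast; ring
      have e2 : pos + ((run'.length + 1 : Nat) : Int) = pos + 1 + run'.length := by push_cast; ring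
      rw [e1, e2]
    · rw [loopRev_cons, if_neg h5, if_neg (by push_cast; omega)]

theorem main_runs : ∀ (n : Nat) (rev : List Char), rev.length ≤ n → ∀ (pos g nt : Int) (t : Int),
    (match rev with
     | [] => True
     | c :: _ => if c = '.' then g = 0 ∧ 0 ≤ nt ∧ nt ≤ 5 else nt = 0) →
    loopRev rev pos g nt t = consumeRuns (rleFwd rev) pos g t := by
  intro n
  induction n using Nat.strong_induction_on with
  | _ n ih =>
    intro rev hlen pos g nt t hcond
    cases rev with
    | nil => rfl
    | cons c cs =>
      have hcs : cs.takeWhile (fun x => (x == '.') == (c == '.'))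
          ++ cs.dropWhile (fun x => (x == '.') == (c == '.')) = cs :=
        List.takeWhile_append_dropWhile
      obtain ⟨run', rest, hsplit, hclass, hresthd, hrestlen⟩ :
          ∃ run' rest, run' ++ rest = cs ∧ (∀ x ∈ run', (x == '.') = (c == '.')) ∧
            (match rest.head? with | some c' => (c' == '.') = !(c == '.') | none => True) ∧
            rest.length ≤ cs.length := by
        refine ⟨_, _, hcs, ?_, ?_, ?_⟩
        · intro x hx
          have := List.mem_takeWhile_imp hx
          simpa using this
        · have h := List.head?_dropWhile_not (fun x => (x == '.') == (c == '.')) cs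
          revert h
          cases hh : (cs.dropWhile (fun x => (x == '.') == (c == '.'))).head? with
          | none => intro _; trivial
          | some c' =>
            intro h
            simp only [hh]
            cases hx : (c' == '.') <;> cases hy : (c == '.') <;> simp_all
        · exact List.length_dropWhile_le _ _
      have hlen' : rest.length < n := by
        have := congrArg List.length hsplit
        simp at this hlen
        omega
      rw [← hsplit]
      show loopRev ((c :: run') ++ rest) pos g nt t
        = consumeRuns (rleFwd ((c :: run') ++ rest)) pos g t
      rw [rleFwd_run (c :: run') rest (c == '.') (by simp)
            (by intro x hx; rcases List.mem_cons.mp hx with h | h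
                · subst h; rfl
                · exact hclass x h)
            hresthd]
      by_cases hcdot : c = '.'
      · -- gap run
        have hb : (c == '.') = true := by simp [hcdot]
        obtain ⟨hg0, hnt0, hnt5⟩ : g = 0 ∧ 0 ≤ nt ∧ nt ≤ 5 := by
          simpa [hcdot] using hcond
        have hrep : c :: run' = List.replicate (run'.length + 1) '.' := by
          rw [List.eq_replicate_iff]
          refine ⟨by simp, ?_⟩
          intro x hx
          rcases List.mem_cons.mp hx with h | h
          · rw [h, hcdot]
          · have := hclass x h; rw [hb] at this; simpa using this
        rw [hrep, loopRev_gap_run run'.length rest pos g nt t hnt5,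
          consumeRuns_cons, if_pos hb]
        simp only [List.length_replicate]
        rw [ih rest.length hlen' rest le_rfl _ _ 0 t ?cond]
        case cond =>
          cases rest with
          | nil => trivial
          | cons c' cs' =>
            have h' : c' ≠ '.' := by
              have : (c' == '.') = false := by simpa [hb] using hresthd
              simpa using this
            simp [h']
        congr 1 <;> (simp; omega)
      · -- non-gap run
        have hb : (c == '.') = false := by simp [hcdot]
        have hnt0 : nt = 0 := by simpa [hcdot] using hcond
        have hclass' : ∀ x ∈ run', (x == '.') = false := fun x hx => by
          rw [hclass x hx]; exact hb
        have hrhd : match rest.head? with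
            | some c' => (c' == '.') = true | none => True := by
          cases hh : rest.head? with
          | none => trivial
          | some c' =>
            simp only [hh] at hresthd ⊢
            simp [hresthd, hb]
        simp only [List.cons_append]
        rw [loopRev_cons, if_pos (by omega : nt ≤ 5), if_neg hcdot, hnt0,
          loopRev_nt_run run' rest (pos + 1) (0 + 1) _ hclass' (by omega) (by omega),
          consumeRuns_cons, if_neg (by simp [hb] : ¬ ((c == '.') = true))]
        simp only [List.length_cons]
        have e3 : ((run'.length + 1 : Nat) : Int) = (run'.length : Int) + 1 := by push_cast; ring
        rw [e3]
        by_cases hA : (run'.length : Int) + 1 ≤ 5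
        · rw [if_pos (show (0 : Int) + 1 + (run'.length : Int) ≤ 6 by omega),
            if_neg (show ¬ ((run'.length : Int) + 1 ≥ 5 + 1) by omega)]
          rw [ih rest.length hlen' rest le_rfl _ 0 (0 + 1 + (run'.length : Int)) _ ?cond2]
          case cond2 =>
            cases rest with
            | nil => trivial
            | cons c' cs' =>
              have hc' : c' = '.' := by simpa using hrhd
              simp [hc']
              omega
          congr 1
          omega
        · by_cases hB : (run'.length : Int) + 1 ≤ 6
          · rw [if_pos (show (0 : Int) + 1 + (run'.length : Int) ≤ 6 by omega),
              if_pos (show (run'.length : Int) + 1 ≥ 5 + 1 by omega)]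
            cases rest with
            | nil => rw [loopRev_nil]
            | cons c' cs' =>
              rw [loopRev_cons, if_neg (show ¬ ((0 : Int) + 1 + (run'.length : Int) ≤ 5) by omega)]
          · rw [if_neg (show ¬ ((0 : Int) + 1 + (run'.length : Int) ≤ 6) by omega),
              if_pos (show (run'.length : Int) + 1 ≥ 5 + 1 by omega)]

-- ===== VERDICT (by name: the statement is the Claim_ definition above) =====
theorem nbRightGaps_spec : Claim_equal_nbRightGaps := by
  intro seq _
  unfold Spec_nbRightGaps nbRightGaps nbRightGaps_alt
  rw [foldl_rleStep, ← main_runs seq.toList.reverse.length seq.toList.reverse le_rfl 0 0 0 0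
        (by cases h : seq.toList.reverse with | nil => trivial | cons c cs => split <;> simp)]
  have hl : PySem.Str.len seq = (seq.toList.length : Int) := by simp [PySem.Str.len_eq]
  rw [hl, loopA_eq_loopRev seq.toList seq.toList.length le_rfl]
  rw [List.take_length]
  norm_num
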